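-- pv_equiv track=rewrite | github.com/Mar4eluk2/kpcrypt | classical.py | kasiski
-- ===== SOURCE A (Python) =====
-- from collections import defaultdict
--
-- def normalize_text(text):
--     return ''.join(c for c in text.upper() if c.isalpha())
--
-- def kasiski(text, seq_len=3):
--     text = normalize_text(text)
--     positions = defaultdict(list)
--
--     for i in range(len(text) - seq_len + 1):
--         seq = text[i:i + seq_len]
--         positions[seq].append(i)
--
--     distances = []
--     for seq, pos in positions.items():
--         if len(pos) > 1:
--             for i in range(len(pos) - 1):
--                 distances.append(pos[i + 1] - pos[i])
--
--     return distances
-- ===== SOURCE B (Python) =====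
-- def normalize_text(text):
--     return ''.join(c for c in text.upper() if c.isalpha())
--
-- def kasiski(text, seq_len=3):
--     # one pass: remember only the previous position of each substring and
--     # collect each distance the moment the substring recurs
--     text = normalize_text(text)
--     last = {}
--     buckets = {}
--     for i in range(len(text) - seq_len + 1):
--         seq = text[i:i + seq_len]
--         if seq in last:
--             buckets[seq].append(i - last[seq])
--         else:
--             buckets[seq] = []
--         last[seq] = i
--     distances = []
--     for v in buckets.values():
--         distances.extend(v)
--     return distances
-- ===== Notes on version B (the rewrite author's own statement) =====
-- stated objective: alternative
-- what changed: Instead of storing the full position list of every substring and differencing consecutive positions in a separate second loop over the dict, B keeps only the previous position of each substring in a last-seen dict and emits each distance online in the single scan, then concatenates the per-substring buckets in first-appearance order.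
import Mathlib
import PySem

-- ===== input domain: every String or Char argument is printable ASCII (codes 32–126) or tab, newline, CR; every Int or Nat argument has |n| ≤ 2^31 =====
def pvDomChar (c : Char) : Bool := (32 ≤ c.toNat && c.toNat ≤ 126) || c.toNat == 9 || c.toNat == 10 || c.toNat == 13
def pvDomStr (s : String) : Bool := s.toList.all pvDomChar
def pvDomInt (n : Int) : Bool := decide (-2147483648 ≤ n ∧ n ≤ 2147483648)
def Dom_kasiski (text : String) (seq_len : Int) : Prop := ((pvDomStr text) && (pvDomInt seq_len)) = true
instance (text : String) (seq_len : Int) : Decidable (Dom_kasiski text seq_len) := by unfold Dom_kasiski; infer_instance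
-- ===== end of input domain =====

-- B collects each repeat distance online with a last-position dict in ONE pass
-- (no stored position lists, no second differencing loop); objective: alternative.

-- ===== PORT A =====
-- normalize_text: ''.join(c for c in text.upper() if c.isalpha()); shared by both ports
def pvNormalize (text : String) : List Char :=
  (PySem.Chars.upper text.toList).filter (fun c => PySem.Chars.isalpha c)

def kasiski (text : String) (seq_len : Int) : List Int :=
  let t := pvNormalize text
  let positions : PySem.Dict (List Char) (List Int) :=
    (PySem.List.pyRange 0 ((t.length : Int) - seq_len + 1) 1).foldl
      (fun d i => d.modify (PySem.List.slice t (some i) (some (i + seq_len))) [] (fun l => l ++ [i]))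
      PySem.Dict.empty
  positions.items.foldl
    (fun distances p =>
      if 1 < p.2.length then
        (PySem.List.pyRange 0 ((p.2.length : Int) - 1) 1).foldl
          (fun acc j => acc ++ [PySem.List.pyGetD p.2 (j + 1) 0 - PySem.List.pyGetD p.2 j 0])
          distances
      else distances)
    []

-- ===== PORT B =====
def kasiski_alt (text : String) (seq_len : Int) : List Int :=
  let t := pvNormalize text
  let st :=
    (PySem.List.pyRange 0 ((t.length : Int) - seq_len + 1) 1).foldl
      (fun st i =>
        let seq := PySem.List.slice t (some i) (some (i + seq_len))
        match st.1.get? seq with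
        | some j => (st.1.insert seq i, st.2.modify seq [] (fun l => l ++ [i - j]))
        | none => (st.1.insert seq i, st.2.insert seq ([] : List Int)))
      ((PySem.Dict.empty : PySem.Dict (List Char) Int),
       (PySem.Dict.empty : PySem.Dict (List Char) (List Int)))
  st.2.values.foldl (fun acc v => acc ++ v) []

-- ===== PRECONDITION & SPEC =====
def Spec_kasiski (text : String) (seq_len : Int) (out : List Int) : Prop := out = kasiski_alt text seq_len
instance (text : String) (seq_len : Int) (out : List Int) : Decidable (Spec_kasiski text seq_len out) := by unfold Spec_kasiski; infer_instance

-- ===== CLAIM (what is proved, stated in full; the proofs are below) =====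
def Claim_equal_kasiski : Prop := ∀ (text : String) (seq_len : Int), Dom_kasiski text seq_len → Spec_kasiski text seq_len (kasiski text seq_len)

-- ===== LEMMAS AND PROOFS =====

-- adjacent differences of a list (the spec-level value both loops produce per key)
def pvDiffs : List Int → List Int
  | [] => []
  | [_] => []
  | a :: b :: t => (b - a) :: pvDiffs (b :: t)

-- proof-side views of one grouped entry: its last position / its distance list
def pvLastF (p : List Char × List Int) : List Char × Int := (p.1, (p.2.getLast?).getD 0)
def pvDiffF (p : List Char × List Int) : List Char × List Int := (p.1, pvDiffs p.2)

lemma pvDiffs_short (v : List Int) (h : v.length ≤ 1) : pvDiffs v = [] := by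
  match v with
  | [] => rfl
  | [_] => rfl
  | a :: b :: t => simp at h

lemma pvDiffs_append_last (v : List Int) (i : Int) (h : v ≠ []) :
    pvDiffs (v ++ [i]) = pvDiffs v ++ [i - (v.getLast?).getD 0] := by
  induction v with
  | nil => simp at h
  | cons a rest ih =>
    cases rest with
    | nil => simp [pvDiffs]
    | cons b t =>
      have := ih (by simp)
      simp only [List.cons_append, pvDiffs] at this ⊢
      rw [this, List.getLast?_cons_cons]

lemma pvDiffs_eq_map_range (v : List Int) :
    (List.range (v.length - 1)).map (fun k => v.getD (k + 1) 0 - v.getD k 0) = pvDiffs v := by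
  match v with
  | [] => rfl
  | [_] => rfl
  | a :: b :: t =>
    have ih := pvDiffs_eq_map_range (b :: t)
    simp only [List.length_cons, Nat.add_sub_cancel] at ih ⊢
    rw [List.range_succ_eq_map]
    simp only [List.map_cons, List.map_map, pvDiffs]
    refine List.cons_eq_cons.mpr ⟨by simp [List.getD], ?_⟩
    rw [← ih]
    refine List.map_congr_left ?_
    intro k hk
    simp [Function.comp]

lemma pvFind?_map {V W : Type} (f : List Char × V → List Char × W) (hk : ∀ p, (f p).1 = p.1)
    (e : List (List Char × V)) (s : List Char) :
    List.find? (fun p => p.1 == s) (e.map f) = (e.find? (fun p => p.1 == s)).map f := by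
  induction e with
  | nil => simp
  | cons a e ih =>
    by_cases h : a.1 == s <;> simp [hk, h, ih]

lemma pvAny_map {V W : Type} (f : List Char × V → List Char × W) (hk : ∀ p, (f p).1 = p.1)
    (e : List (List Char × V)) (s : List Char) :
    (e.map f).any (fun p => p.1 == s) = e.any (fun p => p.1 == s) := by
  rw [List.any_map]
  refine PySem.List.any_congr_mem ?_
  intro p hp
  simp [Function.comp, hk]

-- one step of the two loops, coupled
lemma pvStep (s : List Char) (i : Int) (e : List (List Char × List Int))
    (hne : ∀ p ∈ e, p.2 ≠ []) :
    ((match (PySem.Dict.mk (e.map pvLastF)).get? s with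
      | some j => ((PySem.Dict.mk (e.map pvLastF)).insert s i,
                   (PySem.Dict.mk (e.map pvDiffF)).modify s [] (fun l => l ++ [i - j]))
      | none => ((PySem.Dict.mk (e.map pvLastF)).insert s i,
                 (PySem.Dict.mk (e.map pvDiffF)).insert s ([] : List Int)))
      = (PySem.Dict.mk ((((PySem.Dict.mk e).modify s [] (fun l => l ++ [i])).items).map pvLastF),
         PySem.Dict.mk ((((PySem.Dict.mk e).modify s [] (fun l => l ++ [i])).items).map pvDiffF)))
    ∧ (∀ p ∈ (((PySem.Dict.mk e).modify s [] (fun l => l ++ [i])).items), p.2 ≠ []) := by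
  have hfl := pvFind?_map pvLastF (fun p => rfl) e s
  have hfd := pvFind?_map pvDiffF (fun p => rfl) e s
  have hal := pvAny_map pvLastF (fun p => rfl) e s
  have had := pvAny_map pvDiffF (fun p => rfl) e s
  cases hf : e.find? (fun p => p.1 == s) with
  | none =>
    have hany : (e.any fun p => p.1 == s) = false :=
      List.any_eq_false.mpr (List.find?_eq_none.mp hf)
    constructor
    · simp only [PySem.Dict.get?, PySem.Dict.modify, PySem.Dict.insert, PySem.Dict.getD,
        PySem.Dict.contains, hfl, hal, had, hf, hany,
        Option.map_none, Option.getD_none, Bool.false_eq_true, if_false]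
      simp [pvLastF, pvDiffF, pvDiffs]
    · simp only [PySem.Dict.get?, PySem.Dict.modify, PySem.Dict.insert, PySem.Dict.getD,
        PySem.Dict.contains, hf, hany,
        Option.map_none, Option.getD_none, Bool.false_eq_true, if_false]
      intro p hp
      rcases List.mem_append.mp hp with h | h
      · exact hne p h
      · simp at h; subst h; simp
  | some p0 =>
    have hp0 : p0 ∈ e := List.mem_of_find?_eq_some hf
    have hkey : p0.1 = s := by simpa using List.find?_some hf
    have hv : p0.2 ≠ [] := hne p0 hp0
    have hany : (e.any fun p => p.1 == s) = true :=
      List.any_eq_true.mpr ⟨p0, hp0, by simp [hkey]⟩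
    constructor
    · simp only [PySem.Dict.get?, PySem.Dict.modify, PySem.Dict.insert, PySem.Dict.getD,
        PySem.Dict.contains, hfl, hfd, hal, had, hf, hany,
        Option.map_some, Option.getD_some, if_true]
      simp only [Prod.mk.injEq]
      constructor
      · simp only [List.map_map]
        refine congrArg PySem.Dict.mk (List.map_congr_left ?_)
        intro p hp
        by_cases h : (p.1 == s) = true
        · simp [Function.comp, pvLastF, h]
        · simp [Function.comp, pvLastF, h]
      · simp only [List.map_map]
        refine congrArg PySem.Dict.mk (List.map_congr_left ?_)
        intro p hp
        by_cases h : (p.1 == s) = true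
        · simp [Function.comp, pvDiffF, pvLastF, h, pvDiffs_append_last p0.2 i hv]
        · simp [Function.comp, pvDiffF, h]
    · simp only [PySem.Dict.get?, PySem.Dict.modify, PySem.Dict.insert, PySem.Dict.getD,
        PySem.Dict.contains, hf, hany,
        Option.map_some, Option.getD_some, if_true]
      intro p hp
      obtain ⟨q, hq, rfl⟩ := List.mem_map.mp hp
      by_cases h : (q.1 == s) = true
      · simp [h]
      · simpa [h] using hne q hq

-- the coupled loop invariant over any index list
lemma pvLoop (t : List Char) (slen : Int) (l : List Int) (e : List (List Char × List Int))
    (hne : ∀ p ∈ e, p.2 ≠ []) :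
    (l.foldl
        (fun st i =>
          let seq := PySem.List.slice t (some i) (some (i + slen))
          match st.1.get? seq with
          | some j => (st.1.insert seq i, st.2.modify seq [] (fun l => l ++ [i - j]))
          | none => (st.1.insert seq i, st.2.insert seq ([] : List Int)))
        (PySem.Dict.mk (e.map pvLastF), PySem.Dict.mk (e.map pvDiffF))
      = (PySem.Dict.mk (((l.foldl
            (fun d i => d.modify (PySem.List.slice t (some i) (some (i + slen))) [] (fun l => l ++ [i]))
            (PySem.Dict.mk e)).items).map pvLastF),
         PySem.Dict.mk (((l.foldl
            (fun d i => d.modify (PySem.List.slice t (some i) (some (i + slen))) [] (fun l => l ++ [i]))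
            (PySem.Dict.mk e)).items).map pvDiffF)))
    ∧ (∀ p ∈ ((l.foldl
            (fun d i => d.modify (PySem.List.slice t (some i) (some (i + slen))) [] (fun l => l ++ [i]))
            (PySem.Dict.mk e)).items), p.2 ≠ []) := by
  induction l generalizing e with
  | nil => exact ⟨rfl, hne⟩
  | cons i l ih =>
    obtain ⟨h1, hne'⟩ := pvStep (PySem.List.slice t (some i) (some (i + slen))) i e hne
    simp only [List.foldl_cons]
    rw [h1]
    exact ih _ hne'

-- A's per-key differencing loop produces pvDiffs
lemma pvInner (v : List Int) (acc : List Int) :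
    (if 1 < v.length then
      (PySem.List.pyRange 0 ((v.length : Int) - 1) 1).foldl
        (fun acc j => acc ++ [PySem.List.pyGetD v (j + 1) 0 - PySem.List.pyGetD v j 0]) acc
     else acc) = acc ++ pvDiffs v := by
  split
  · rw [PySem.List.foldl_append_singleton_eq_map]
    congr 1
    rw [PySem.List.pyRange_one, List.map_map]
    have hn : (((v.length : Int) - 1) - 0).toNat = v.length - 1 := by omega
    rw [hn, ← pvDiffs_eq_map_range v]
    refine List.map_congr_left ?_
    intro k hk
    have h1 : ((0 : Int) + (k : Int)) = ((k : Nat) : Int) := by ring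
    have h3 : ((k : Int) + 1) = (((k + 1 : Nat)) : Int) := by push_cast; ring
    simp only [Function.comp, h1, h3, PySem.List.pyGetD_natCast]
  · rename_i h
    rw [pvDiffs_short v (by omega), List.append_nil]

-- ===== VERDICT (by name: the statement is the Claim_ definition above) =====
theorem kasiski_spec : Claim_equal_kasiski := by
  intro text seq_len _
  unfold Spec_kasiski
  simp only [kasiski, kasiski_alt]
  obtain ⟨hB, -⟩ := pvLoop (pvNormalize text) seq_len
    (PySem.List.pyRange 0 (((pvNormalize text).length : Int) - seq_len + 1) 1) [] (by simp)
  have hB' :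
      (PySem.List.pyRange 0 (((pvNormalize text).length : Int) - seq_len + 1) 1).foldl
        (fun (st : PySem.Dict (List Char) Int × PySem.Dict (List Char) (List Int)) (i : Int) =>
          let seq := PySem.List.slice (pvNormalize text) (some i) (some (i + seq_len))
          match st.1.get? seq with
          | some j => (st.1.insert seq i, st.2.modify seq [] (fun l => l ++ [i - j]))
          | none => (st.1.insert seq i, st.2.insert seq ([] : List Int)))
        ((PySem.Dict.empty : PySem.Dict (List Char) Int),
         (PySem.Dict.empty : PySem.Dict (List Char) (List Int)))
      = (PySem.Dict.mk ((((PySem.List.pyRange 0 (((pvNormalize text).length : Int) - seq_len + 1) 1).foldl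
            (fun d i => d.modify (PySem.List.slice (pvNormalize text) (some i) (some (i + seq_len))) [] (fun l => l ++ [i]))
            (PySem.Dict.empty : PySem.Dict (List Char) (List Int))).items).map pvLastF),
         PySem.Dict.mk ((((PySem.List.pyRange 0 (((pvNormalize text).length : Int) - seq_len + 1) 1).foldl
            (fun d i => d.modify (PySem.List.slice (pvNormalize text) (some i) (some (i + seq_len))) [] (fun l => l ++ [i]))
            (PySem.Dict.empty : PySem.Dict (List Char) (List Int))).items).map pvDiffF)) := hB
  rw [hB']
  generalize (((PySem.List.pyRange 0 (((pvNormalize text).length : Int) - seq_len + 1) 1).foldl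
      (fun d i => d.modify (PySem.List.slice (pvNormalize text) (some i) (some (i + seq_len))) [] (fun l => l ++ [i]))
      (PySem.Dict.empty : PySem.Dict (List Char) (List Int))).items) = E
  have hA := PySem.List.foldl_congr_mem
      (l := E) (init := ([] : List Int))
      (f := fun distances p => if 1 < p.2.length then
          (PySem.List.pyRange 0 ((p.2.length : Int) - 1) 1).foldl
            (fun acc j => acc ++ [PySem.List.pyGetD p.2 (j + 1) 0 - PySem.List.pyGetD p.2 j 0]) distances
        else distances)
      (g := fun acc p => acc ++ pvDiffs p.2)
      (fun acc p _ => pvInner p.2 acc)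
  rw [hA, PySem.List.foldl_append_eq_flatMap]
  simp only [PySem.Dict.values, List.map_map]
  rw [PySem.List.foldl_append_eq_flatten]
  simp [List.flatMap_def, Function.comp_def, pvDiffF]
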